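-- pv_equiv track=rewrite | github.com/PreludeAndFugue/AdventOfCode | 24_1.py | is_four_quarters
-- ===== SOURCE A (Python) =====
-- def get_third(selection, other_items, total):
--     for i, n in enumerate(other_items):
--         new_selection = selection + [n]
--         if sum(new_selection) < total:
--             new_other_items = other_items[i + 1:]
--             yield from get_third(new_selection, new_other_items, total)
--         elif sum(new_selection) == total:
--             yield new_selection
--
-- def remove_third(items, third):
--     third = set(third)
--     return [n for n in items if n not in third]
--
-- def is_four_quarters(items, total):
--     second_quarter = get_third([], items, total)
--     for s in second_quarter:
--         others = remove_third(items, s)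
--         third_quarter = get_third([], others, total)
--         try:
--             next(third_quarter)
--             return True
--         except:
--             continue
--     return False
-- ===== SOURCE B (Python) =====
-- def _reaches(items, total):
--     sums = {0}
--     found = False
--     for n in items:
--         new_sums = set()
--         for s in sums:
--             t = s + n
--             if t == total:
--                 found = True
--             elif t < total:
--                 new_sums.add(t)
--         sums |= new_sums
--     return found
--
--
-- def is_four_quarters(items, total):
--     partial = {(0, frozenset())}
--     completed = set()
--     for n in items:
--         new_partial = set()
--         for s, vs in partial:
--             t = s + n
--             if t < total:
--                 new_partial.add((t, vs | {n}))
--             elif t == total: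
--                 w = vs | {n}
--                 if w not in completed:
--                     completed.add(w)
--                     if _reaches([x for x in items if x not in w], total):
--                         return True
--         partial |= new_partial
--     return False
-- ===== Notes on version B (the rewrite author's own statement) =====
-- stated objective: alternative
-- what changed: A's lazy recursive generator search (with a second generator probed by next()) is replaced by a single forward pass over the items that maintains a deduplicated set of (partial sum, value-set) states, checks each newly completed value-set at most once (memoised in 'completed') and returns immediately on success, with the second-subset check done by a reachable-subset-sums DP instead of the recursive generator.
import Mathlib
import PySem

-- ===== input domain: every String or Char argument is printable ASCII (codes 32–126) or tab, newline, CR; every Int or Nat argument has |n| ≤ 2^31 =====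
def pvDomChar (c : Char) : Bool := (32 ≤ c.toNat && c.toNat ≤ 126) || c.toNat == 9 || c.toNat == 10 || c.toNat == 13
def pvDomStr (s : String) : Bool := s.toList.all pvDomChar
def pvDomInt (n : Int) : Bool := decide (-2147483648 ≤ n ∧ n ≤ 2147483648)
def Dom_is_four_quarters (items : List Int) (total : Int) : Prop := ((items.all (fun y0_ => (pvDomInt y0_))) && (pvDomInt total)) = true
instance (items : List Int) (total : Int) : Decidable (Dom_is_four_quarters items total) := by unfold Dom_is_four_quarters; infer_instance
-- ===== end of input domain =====

-- B replaces A's lazy recursive generator search by two forward passes: a state-set pass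
-- collecting the distinct value-sets of qualifying subsets, and a reachable-sums DP for the
-- second check (objective: alternative algorithm, with state dedup).

-- ===== PORT A =====
-- get_third: the generator is ported as the list of all values it yields, in yield order.
def getThird (selection : List Int) (other_items : List Int) (total : Int) : List (List Int) :=
  match other_items with
  | [] => []
  | n :: rest =>
    -- loop iteration for element n (i = current index): recurse on other_items[i+1:] = rest
    (if (selection ++ [n]).sum < total then getThird (selection ++ [n]) rest total
     else if (selection ++ [n]).sum = total then [selection ++ [n]] else [])
    ++ getThird selection rest total

def removeThird (items : List Int) (third : List Int) : List Int :=
  let t : PySem.Set Int := PySem.Set.ofList third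
  items.filter (fun nn => !(PySem.Set.contains t nn))

-- main loop: 'try: next(gen); return True; except: continue' = test whether the generator
-- yields anything, i.e. whether the list of yielded values is nonempty.
def is_four_quarters (items : List Int) (total : Int) : Bool :=
  (getThird [] items total).any
    (fun s => !(getThird [] (removeThird items s) total).isEmpty)

-- ===== PORT B =====
-- _reaches: forward DP; one iteration of the outer 'for n in items' loop.
def bStep (total : Int) (st : List Int × Bool) (n : Int) : List Int × Bool :=
  let inner := st.1.foldl
    (fun (ac : List Int × Bool) s =>
      if s + n = total then (ac.1, true)
      else if s + n < total then (PySem.Set.add ac.1 (s + n), ac.2)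
      else ac)
    ((PySem.Set.empty : List Int), st.2)
  (PySem.Set.union st.1 inner.1, inner.2)

def pyReaches (items : List Int) (total : Int) : Bool :=
  (items.foldl (bStep total) (PySem.Set.ofList [0], false)).2

-- main forward pass; a Python frozenset of ints is ported as a PySem.Set Int (built in
-- first-insertion order).  The sets 'partial'/'completed' then dedup states by that list
-- rather than extensionally, which may keep extra set-equal states; the returned Bool is
-- unaffected since only membership in a value-set is consumed.  'return True' inside the
-- loops is ported as a sticky found-flag threaded through the folds.
def rbCheck (items0 : List Int) (total : Int) (w : List Int) : Bool :=
  pyReaches (items0.filter (fun x => !(PySem.Set.contains w x))) total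

def qInner (items0 : List Int) (total n : Int)
    (ac : List (Int × List Int) × List (List Int) × Bool) (p : Int × List Int) :
    List (Int × List Int) × List (List Int) × Bool :=
  if ac.2.2 then ac
  else if p.1 + n < total then (PySem.Set.add ac.1 (p.1 + n, PySem.Set.add p.2 n), ac.2.1, ac.2.2)
  else if p.1 + n = total then
    (if PySem.Set.contains ac.2.1 (PySem.Set.add p.2 n) then ac
     else (ac.1, PySem.Set.add ac.2.1 (PySem.Set.add p.2 n),
           rbCheck items0 total (PySem.Set.add p.2 n)))
  else ac

def qStep (items0 : List Int) (total : Int)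
    (st : List (Int × List Int) × List (List Int) × Bool) (n : Int) :
    List (Int × List Int) × List (List Int) × Bool :=
  if st.2.2 then st
  else
    let inner := st.1.foldl (qInner items0 total n)
      ((PySem.Set.empty : List (Int × List Int)), st.2.1, st.2.2)
    (PySem.Set.union st.1 inner.1, inner.2.1, inner.2.2)

def is_four_quarters_alt (items : List Int) (total : Int) : Bool :=
  (items.foldl (qStep items total)
    (PySem.Set.ofList [((0 : Int), (PySem.Set.empty : List Int))],
     (PySem.Set.empty : List (List Int)), false)).2.2

-- ===== PRECONDITION & SPEC =====
def Spec_is_four_quarters (items : List Int) (total : Int) (out : Bool) : Prop := out = is_four_quarters_alt items total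
instance (items : List Int) (total : Int) (out : Bool) : Decidable (Spec_is_four_quarters items total out) := by unfold Spec_is_four_quarters; infer_instance

-- ===== CLAIM (what is proved, stated in full; the proofs are below) =====
def Claim_equal_is_four_quarters : Prop := ∀ (items : List Int) (total : Int), Dom_is_four_quarters items total → Spec_is_four_quarters items total (is_four_quarters items total)


-- ===== LEMMAS AND PROOFS =====

-- 'was anything yielded?' predicate: b is the running sum of the current selection.
def foundB (total : Int) : Int → List Int → Bool
  | _, [] => false
  | b, n :: rest =>
    (if b + n < total then foundB total (b + n) rest else false)
    || (decide (b + n = total)) || foundB total b rest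

-- the suffixes get_third appends to its current selection, in yield order.
def sols (total : Int) : Int → List Int → List (List Int)
  | _, [] => []
  | b, n :: rest =>
    (if b + n < total then (sols total (b + n) rest).map (n :: ·)
     else if b + n = total then [[n]] else [])
    ++ sols total b rest

def insAll (w : List Int) (s : List Int) : List Int := s.foldl PySem.Set.add w

lemma insAll_cons (w : List Int) (n : Int) (s : List Int) :
    insAll w (n :: s) = insAll (PySem.Set.add w n) s := rfl

lemma foundB_cons (total b n : Int) (rest : List Int) :
    foundB total b (n :: rest) = true
    ↔ (b + n < total ∧ foundB total (b + n) rest = true) ∨ b + n = total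
      ∨ foundB total b rest = true := by
  simp only [foundB, Bool.or_eq_true, decide_eq_true_eq]
  by_cases h : b + n < total <;> simp [h, or_assoc]

lemma mem_sols_cons (total b n : Int) (rest : List Int) (s : List Int) :
    s ∈ sols total b (n :: rest)
    ↔ (b + n < total ∧ ∃ s' ∈ sols total (b + n) rest, s = n :: s')
      ∨ (b + n = total ∧ s = [n]) ∨ s ∈ sols total b rest := by
  simp only [sols, List.mem_append]
  split_ifs with h1 h2
  · have h2 : ¬(b + n = total) := by omega
    simp [h1, h2, eq_comm]
  · simp [h2]
  · simp [h1, h2]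

lemma getThird_eq_map_sols (total : Int) :
    ∀ (others sel : List Int), getThird sel others total = (sols total sel.sum others).map (sel ++ ·) := by
  intro others
  induction others with
  | nil => intro sel; simp [getThird, sols]
  | cons n rest ih =>
    intro sel
    have hsum : (sel ++ [n]).sum = sel.sum + n := by simp
    simp only [getThird, sols, hsum, ih]
    split_ifs with h1 h2
    · simp [List.map_map, Function.comp]
    · simp
    · simp

lemma sols_ne_nil (total : Int) :
    ∀ (others : List Int) (b : Int), sols total b others ≠ [] ↔ foundB total b others = true := by
  intro others
  induction others with
  | nil => intro b; simp [sols, foundB]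
  | cons n rest ih =>
    intro b
    rw [Ne, List.eq_nil_iff_forall_not_mem, foundB_cons]
    push Not
    constructor
    · rintro ⟨s, hs⟩
      rw [mem_sols_cons] at hs
      rcases hs with ⟨hlt, s', hs', _⟩ | ⟨heq, _⟩ | hs
      · exact Or.inl ⟨hlt, (ih (b + n)).1 (List.ne_nil_of_mem hs')⟩
      · exact Or.inr (Or.inl heq)
      · exact Or.inr (Or.inr ((ih b).1 (List.ne_nil_of_mem hs)))
    · rintro (⟨hlt, hf⟩ | heq | hf)
      · rcases List.exists_mem_of_ne_nil _ ((ih (b + n)).2 hf) with ⟨s', hs'⟩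
        exact ⟨n :: s', (mem_sols_cons ..).2 (Or.inl ⟨hlt, s', hs', rfl⟩)⟩
      · exact ⟨[n], (mem_sols_cons ..).2 (Or.inr (Or.inl ⟨heq, rfl⟩))⟩
      · rcases List.exists_mem_of_ne_nil _ ((ih b).2 hf) with ⟨s, hs⟩
        exact ⟨s, (mem_sols_cons ..).2 (Or.inr (Or.inr hs))⟩

lemma getThird_check (total : Int) (others : List Int) :
    (!(getThird [] others total).isEmpty) = foundB total 0 others := by
  rw [Bool.eq_iff_iff, getThird_eq_map_sols]
  have hne : ∀ (l : List (List Int)), (!l.isEmpty) = true ↔ l ≠ [] := by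
    intro l; cases l <;> simp
  rw [hne]
  simp only [List.sum_nil, Ne, List.map_eq_nil_iff]
  exact sols_ne_nil total others 0

-- ---- inner DP (pyReaches) ----

lemma bStep_inner_split (total n : Int) :
    ∀ (S acP : List Int) (f : Bool),
      (S.foldl (fun (ac : List Int × Bool) s =>
          if s + n = total then (ac.1, true)
          else if s + n < total then (PySem.Set.add ac.1 (s + n), ac.2)
          else ac) (acP, f))
      = (S.foldl (fun acc s =>
            if s + n = total then acc
            else if s + n < total then PySem.Set.add acc (s + n) else acc) acP,
         f || S.any (fun s => decide (s + n = total))) := by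
  intro S
  induction S with
  | nil => intro acP f; simp
  | cons a t ih =>
    intro acP f
    simp only [List.foldl_cons, List.any_cons]
    split_ifs with h1 h2 <;> simp [ih, h1]

lemma mem_addFold (total n : Int) (S acP : List Int) (b' : Int) :
    b' ∈ S.foldl (fun acc s =>
        if s + n = total then acc
        else if s + n < total then PySem.Set.add acc (s + n) else acc) acP
    ↔ b' ∈ acP ∨ ∃ s ∈ S, s + n < total ∧ b' = s + n := by
  have hcongr : S.foldl (fun acc s =>
        if s + n = total then acc
        else if s + n < total then PySem.Set.add acc (s + n) else acc) acP
      = S.foldl (fun acc s => if s + n < total then PySem.Set.add acc (s + n) else acc) acP := by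
    apply PySem.List.foldl_congr_mem
    intro acc s _
    by_cases h : s + n = total
    · simp [h]
    · simp [h]
  rw [hcongr, PySem.List.foldl_ite_eq_foldl_filter (fun s => s + n < total)
    (fun acc s => PySem.Set.add acc (s + n))]
  rw [PySem.Set.mem_foldl_add (f := fun s => s + n)]
  simp [List.mem_filter]
  tauto

lemma pyReaches_fold (total : Int) :
    ∀ (items S : List Int) (f : Bool),
      (items.foldl (bStep total) (S, f)).2
      = (f || S.any (fun b => foundB total b items)) := by
  intro items
  induction items with
  | nil => intro S f; simp [foundB]
  | cons n rest ih =>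
    intro S f
    simp only [List.foldl_cons]
    have hstep : bStep total (S, f) n
        = (PySem.Set.union S (S.foldl (fun acc s =>
              if s + n = total then acc
              else if s + n < total then PySem.Set.add acc (s + n) else acc) PySem.Set.empty),
           f || S.any (fun s => decide (s + n = total))) := by
      simp [bStep, bStep_inner_split]
    rw [hstep, ih]
    rw [Bool.eq_iff_iff]
    simp only [Bool.or_eq_true, List.any_eq_true, PySem.Set.mem_union, mem_addFold,
      decide_eq_true_eq, foundB_cons, PySem.Set.empty, List.not_mem_nil, false_or]
    constructor
    · rintro ((hf | ⟨s, hs, ht⟩) | ⟨b', hb | ⟨s, hs, hlt, rfl⟩, hfound⟩)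
      · exact Or.inl hf
      · exact Or.inr ⟨s, hs, Or.inr (Or.inl ht)⟩
      · exact Or.inr ⟨b', hb, Or.inr (Or.inr hfound)⟩
      · exact Or.inr ⟨s, hs, Or.inl ⟨hlt, hfound⟩⟩
    · rintro (hf | ⟨b, hb, ⟨hlt, hfound⟩ | heq | hfound⟩)
      · exact Or.inl (Or.inl hf)
      · exact Or.inr ⟨b + n, Or.inr ⟨b, hb, hlt, rfl⟩, hfound⟩
      · exact Or.inl (Or.inr ⟨b, hb, heq⟩)
      · exact Or.inr ⟨b, Or.inl hb, hfound⟩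

lemma pyReaches_eq (items : List Int) (total : Int) :
    pyReaches items total = foundB total 0 items := by
  have h0 : (PySem.Set.ofList [(0 : Int)]) = [(0 : Int)] := rfl
  simp [pyReaches, h0, pyReaches_fold]

-- ---- outer pass ----

lemma qInner_sticky (items0 : List Int) (total n : Int) :
    ∀ (P : List (Int × List Int)) (ac : List (Int × List Int) × List (List Int) × Bool),
      ac.2.2 = true → P.foldl (qInner items0 total n) ac = ac := by
  intro P
  induction P with
  | nil => intro ac h; rfl
  | cons a t ih =>
    intro ac h
    simp only [List.foldl_cons, qInner, h, if_true]
    exact ih ac h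

lemma qInner_char (items0 : List Int) (total n : Int) :
    ∀ (P acP : List (Int × List Int)) (C : List (List Int)),
      (∀ v ∈ C, rbCheck items0 total v = false) →
      ((P.foldl (qInner items0 total n) (acP, C, false)).2.2
         = P.any (fun p => decide (p.1 + n = total) && rbCheck items0 total (PySem.Set.add p.2 n)))
      ∧ ((P.foldl (qInner items0 total n) (acP, C, false)).2.2 = false →
          (∀ q, q ∈ (P.foldl (qInner items0 total n) (acP, C, false)).1
              ↔ q ∈ acP ∨ ∃ p ∈ P, p.1 + n < total ∧ q = (p.1 + n, PySem.Set.add p.2 n))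
          ∧ (∀ v ∈ (P.foldl (qInner items0 total n) (acP, C, false)).2.1,
              rbCheck items0 total v = false)) := by
  intro P
  induction P with
  | nil =>
    intro acP C hC
    refine ⟨rfl, fun _ => ⟨fun q => ?_, hC⟩⟩
    simp
  | cons a t ih =>
    intro acP C hC
    by_cases h1 : a.1 + n < total
    · have h2 : ¬(a.1 + n = total) := by omega
      have hstep : qInner items0 total n (acP, C, false) a
          = (PySem.Set.add acP (a.1 + n, PySem.Set.add a.2 n), C, false) := by
        simp [qInner, h1]
      rcases ih (PySem.Set.add acP (a.1 + n, PySem.Set.add a.2 n)) C hC with ⟨e1, e2⟩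
      refine ⟨?_, ?_⟩
      · simp only [List.foldl_cons, hstep, List.any_cons, e1, h2]
        simp
      · intro hf
        simp only [List.foldl_cons, hstep] at hf ⊢
        rcases e2 hf with ⟨m1, m2⟩
        refine ⟨fun q => ?_, m2⟩
        rw [m1 q]
        simp [PySem.Set.mem_add, h1]
        tauto
    · by_cases h2 : a.1 + n = total
      · by_cases hw : (PySem.Set.add a.2 n) ∈ C
        · have hRB : rbCheck items0 total (PySem.Set.add a.2 n) = false := hC _ hw
          have hstep : qInner items0 total n (acP, C, false) a = (acP, C, false) := by
            simp [qInner, h1, hw]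
          rcases ih acP C hC with ⟨e1, e2⟩
          refine ⟨?_, ?_⟩
          · simp only [List.foldl_cons, hstep, List.any_cons, e1, hRB]
            simp
          · intro hf
            simp only [List.foldl_cons, hstep] at hf ⊢
            rcases e2 hf with ⟨m1, m2⟩
            refine ⟨fun q => ?_, m2⟩
            rw [m1 q]
            simp [h1]
        · by_cases hRB : rbCheck items0 total (PySem.Set.add a.2 n) = true
          · have hstep : qInner items0 total n (acP, C, false) a
                = (acP, PySem.Set.add C (PySem.Set.add a.2 n), true) := by
              simp [qInner, h2, hw, hRB]
            have hrest := qInner_sticky items0 total n t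
              (acP, PySem.Set.add C (PySem.Set.add a.2 n), true) rfl
            refine ⟨?_, ?_⟩
            · simp only [List.foldl_cons, hstep, hrest, List.any_cons, h2, hRB]
              simp
            · intro hf
              simp only [List.foldl_cons, hstep, hrest] at hf
              cases hf
          · have hRB' : rbCheck items0 total (PySem.Set.add a.2 n) = false := by
              simpa using hRB
            have hstep : qInner items0 total n (acP, C, false) a
                = (acP, PySem.Set.add C (PySem.Set.add a.2 n), false) := by
              simp [qInner, h2, hw, hRB']
            have hC' : ∀ v ∈ PySem.Set.add C (PySem.Set.add a.2 n),
                rbCheck items0 total v = false := by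
              intro v hv
              rcases (PySem.Set.mem_add ..).mp hv with hv | rfl
              · exact hC _ hv
              · exact hRB'
            rcases ih acP (PySem.Set.add C (PySem.Set.add a.2 n)) hC' with ⟨e1, e2⟩
            refine ⟨?_, ?_⟩
            · simp only [List.foldl_cons, hstep, List.any_cons, e1, hRB']
              simp
            · intro hf
              simp only [List.foldl_cons, hstep] at hf ⊢
              rcases e2 hf with ⟨m1, m2⟩
              refine ⟨fun q => ?_, m2⟩
              rw [m1 q]
              simp [h1]
      · have hstep : qInner items0 total n (acP, C, false) a = (acP, C, false) := by
          simp [qInner, h1, h2]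
        rcases ih acP C hC with ⟨e1, e2⟩
        refine ⟨?_, ?_⟩
        · simp only [List.foldl_cons, hstep, List.any_cons, e1, h2]
          simp
        · intro hf
          simp only [List.foldl_cons, hstep] at hf ⊢
          rcases e2 hf with ⟨m1, m2⟩
          refine ⟨fun q => ?_, m2⟩
          rw [m1 q]
          simp [h1]

lemma outer_fold (items0 : List Int) (total : Int) :
    ∀ (items : List Int) (P : List (Int × List Int)) (C : List (List Int)) (f : Bool),
      (f = false → ∀ v ∈ C, rbCheck items0 total v = false) →
      (items.foldl (qStep items0 total) (P, C, f)).2.2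
      = (f || P.any (fun p => (sols total p.1 items).any
            (fun s => rbCheck items0 total (insAll p.2 s)))) := by
  intro items
  induction items with
  | nil => intro P C f _; simp [sols]
  | cons n rest ih =>
    intro P C f hC
    cases f with
    | true =>
      have hstep : qStep items0 total (P, C, true) n = (P, C, true) := rfl
      simp only [List.foldl_cons, hstep]
      rw [ih P C true (fun h => by cases h)]
      simp
    | false =>
      rcases qInner_char items0 total n P [] C (hC rfl) with ⟨e1, e2⟩
      have hstep : qStep items0 total (P, C, false) n
          = (PySem.Set.union P (P.foldl (qInner items0 total n)
               (([] : List (Int × List Int)), C, false)).1,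
             (P.foldl (qInner items0 total n)
               (([] : List (Int × List Int)), C, false)).2.1,
             (P.foldl (qInner items0 total n)
               (([] : List (Int × List Int)), C, false)).2.2) := rfl
      by_cases hr : (P.foldl (qInner items0 total n)
          (([] : List (Int × List Int)), C, false)).2.2
      · -- the step found a witness: both sides are true
        simp only [List.foldl_cons, hstep, hr]
        rw [ih _ _ true (fun h => by cases h)]
        rw [e1] at hr
        rcases List.any_eq_true.mp hr with ⟨p, hp, hpb⟩
        obtain ⟨heq, hRB⟩ : p.1 + n = total
            ∧ rbCheck items0 total (PySem.Set.add p.2 n) = true := by simpa using hpb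
        have : P.any (fun p => (sols total p.1 (n :: rest)).any
            (fun s => rbCheck items0 total (insAll p.2 s))) = true := by
          refine List.any_eq_true.mpr ⟨p, hp, List.any_eq_true.mpr ⟨[n], ?_, ?_⟩⟩
          · exact (mem_sols_cons ..).mpr (Or.inr (Or.inl ⟨by simpa using heq, rfl⟩))
          · simpa [insAll] using hRB
        simp [this]
      · have hr' : (P.foldl (qInner items0 total n)
            (([] : List (Int × List Int)), C, false)).2.2 = false := by
          simpa using hr
        rcases e2 hr' with ⟨m1, m2⟩
        have hnone : ∀ p ∈ P, ¬(p.1 + n = total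
            ∧ rbCheck items0 total (PySem.Set.add p.2 n) = true) := by
          rintro p hp ⟨hpe, hpr⟩
          rw [e1] at hr'
          rcases List.any_eq_false.mp hr' p hp with h
          simp [hpe, hpr] at h
        simp only [List.foldl_cons, hstep, hr']
        rw [ih _ _ false (fun _ => m2)]
        rw [Bool.eq_iff_iff]
        simp only [Bool.false_or, List.any_eq_true, PySem.Set.mem_union, m1,
          mem_sols_cons, List.not_mem_nil, false_or]
        constructor
        · rintro ⟨q, hq | ⟨p, hp, hlt, rfl⟩, s, hs, hR⟩
          · exact ⟨q, hq, s, Or.inr (Or.inr hs), hR⟩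
          · exact ⟨p, hp, n :: s, Or.inl ⟨hlt, s, hs, rfl⟩, by rwa [insAll_cons]⟩
        · rintro ⟨p, hp, s, ⟨hlt, s', hs', rfl⟩ | ⟨heq, rfl⟩ | hs, hR⟩
          · exact ⟨(p.1 + n, PySem.Set.add p.2 n), Or.inr ⟨p, hp, hlt, rfl⟩, s', hs',
              by rwa [insAll_cons] at hR⟩
          · exact absurd ⟨heq, by simpa [insAll] using hR⟩ (hnone p hp)
          · exact ⟨p, Or.inl hp, s, hs, hR⟩

lemma filter_eq (items s : List Int) :
    items.filter (fun x => !(PySem.Set.contains (insAll [] s) x))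
      = items.filter (fun nn => !(PySem.Set.contains (PySem.Set.ofList s) nn)) := by
  rfl

-- ===== VERDICT (by name: the statement is the Claim_ definition above) =====
theorem is_four_quarters_spec : Claim_equal_is_four_quarters := by
  intro items total _
  unfold Spec_is_four_quarters
  unfold is_four_quarters is_four_quarters_alt
  rw [show ((PySem.Set.ofList [((0 : Int), (PySem.Set.empty : List Int))],
      (PySem.Set.empty : List (List Int)), false) :
      List (Int × List Int) × List (List Int) × Bool)
      = ([((0 : Int), ([] : List Int))], ([] : List (List Int)), false) from rfl]
  rw [outer_fold items total items [((0 : Int), ([] : List Int))] [] false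
    (fun _ v hv => by cases hv)]
  simp only [List.any_nil, Bool.false_or, List.any_cons, Bool.or_false]
  rw [getThird_eq_map_sols]
  simp only [List.sum_nil, List.nil_append, List.map_id']
  apply PySem.List.any_congr_mem
  intro s _
  show (!(getThird [] (removeThird items s) total).isEmpty)
      = rbCheck items total (insAll [] s)
  rw [getThird_check]
  unfold rbCheck
  rw [pyReaches_eq, filter_eq]
  rfl
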